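-- pv_equiv track=rewrite | github.com/ayahyaaa/Kripto-Tucil4 | src.py | blockstotext
-- ===== SOURCE A (Python) =====
-- def blockstotext(blocks):
--     decryptednum, decrypted = "", ""
--     for numbers in blocks:
--         decryptednum += str(numbers)
--     current = ""
--     for i in range (len(decryptednum)):
--         current += str(decryptednum[i])
--         if (i % 2 != 0):
--             decrypted += chr(int(current)+97)
--             current = ""
--     return decrypted
-- ===== SOURCE B (Python) =====
-- def blockstotext(blocks):
--     out = []
--     carry = ''
--     for n in blocks:
--         t = carry + str(n)
--         k = len(t) // 2
--         for i in range(k):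
--             out.append(chr(int(t[2 * i:2 * i + 2]) + 97))
--         carry = t[2 * k:]
--     return ''.join(out)
-- ===== Notes on version B (the rewrite author's own statement) =====
-- stated objective: alternative
-- what changed: B never materializes the concatenated digit string or A's char-by-char current/parity state machine: it streams block by block, prepending a carried leftover digit to each block's digits, decodes all complete pairs of that chunk by direct slicing, and carries the odd remainder to the next block (the final leftover is dropped, matching A).
import Mathlib
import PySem

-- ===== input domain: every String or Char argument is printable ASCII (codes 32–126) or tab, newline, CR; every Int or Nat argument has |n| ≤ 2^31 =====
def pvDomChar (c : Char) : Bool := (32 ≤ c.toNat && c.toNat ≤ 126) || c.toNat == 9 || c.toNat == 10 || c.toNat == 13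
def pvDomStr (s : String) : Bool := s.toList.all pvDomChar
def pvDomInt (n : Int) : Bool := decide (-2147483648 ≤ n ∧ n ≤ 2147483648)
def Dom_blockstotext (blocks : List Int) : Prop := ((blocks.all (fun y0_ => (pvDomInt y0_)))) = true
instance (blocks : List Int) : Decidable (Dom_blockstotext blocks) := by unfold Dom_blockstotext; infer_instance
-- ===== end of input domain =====

-- B streams the blocks with a one-digit carry, decoding complete pairs per block chunk,
-- instead of A's build-the-whole-string-then-scan parity state machine; objective: alternative.

-- ===== PORT A =====
-- the decoded character for an accumulated two-char chunk; 'int(...)' is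
-- PySem.Int.ofChars?; under Pre_ it is always 'some', the .getD 0 is never used
def pvDecodeChunk (cs : List Char) : Char :=
  Char.ofNat (((PySem.Int.ofChars? cs).getD 0) + 97).toNat

-- A's second loop: for i in range(len(s)): current += s[i]; if i % 2 != 0: flush
-- (structural recursion over the chars with the same state: index i, current, decrypted)
def pvALoop : List Char → Nat → List Char → List Char → List Char
  | [], _, _, decrypted => decrypted
  | c :: rest, i, current, decrypted =>
    let current := current ++ [c]
    if i % 2 ≠ 0 then
      pvALoop rest (i + 1) [] (decrypted ++ [pvDecodeChunk current])
    else
      pvALoop rest (i + 1) current decrypted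

def blockstotext (blocks : List Int) : String :=
  let decryptednum := blocks.foldl (fun acc n => acc ++ PySem.Int.toStr n) ""
  String.ofList (pvALoop decryptednum.toList 0 [] [])

-- ===== PORT B =====
-- Source B's loop: for each block, t = carry + str(n); decode the k = len(t)//2 complete
-- pairs t[2i:2i+2]; the remainder t[2k:] is the carry for the next block
def pvBLoop : List Int → List Char → List Char → List Char
  | [], _, out => out
  | n :: rest, carry, out =>
    let t := carry ++ PySem.Int.toChars n
    let k := t.length / 2
    pvBLoop rest (PySem.List.slice t (some ((2 * k : Nat) : Int)) none)
      (out ++ (List.range k).map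
        (fun i => pvDecodeChunk
          (PySem.List.slice t (some ((2 * i : Nat) : Int)) (some ((2 * i + 2 : Nat) : Int)))))

def blockstotext_alt (blocks : List Int) : String :=
  String.ofList (pvBLoop blocks [] [])

-- ===== PRECONDITION & SPEC =====
-- Pre_ excludes exactly the inputs where Python A raises ValueError: a '-' sign landing at
-- an odd index of the concatenated digit string makes some two-char chunk fail int().
def Pre_blockstotext (blocks : List Int) : Prop :=
  ∀ p ∈ ((blocks.map (fun n => PySem.Int.toChars n)).flatten).zipIdx, p.2 % 2 = 1 → p.1 ≠ '-'
instance (blocks : List Int) : Decidable (Pre_blockstotext blocks) := by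
  unfold Pre_blockstotext; infer_instance

def pvWitness_blockstotext : List Int := [7, 4, 230]

def Spec_blockstotext (blocks : List Int) (out : String) : Prop := out = blockstotext_alt blocks
instance (blocks : List Int) (out : String) : Decidable (Spec_blockstotext blocks out) := by unfold Spec_blockstotext; infer_instance

-- ===== CLAIM (what is proved, stated in full; the proofs are below) =====
def Claim_equal_blockstotext : Prop := ∀ (blocks : List Int), Dom_blockstotext blocks → Pre_blockstotext blocks → Spec_blockstotext blocks (blockstotext blocks)

-- ===== LEMMAS AND PROOFS =====

-- the common characterisation both ports are reduced to: adjacent pairing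
def pvPairUp : List Char → List (Char × Char)
  | c1 :: c2 :: rest => (c1, c2) :: pvPairUp rest
  | _ => []

def pvDecodePairs (t : List Char) : List Char :=
  (pvPairUp t).map (fun p => pvDecodeChunk [p.1, p.2])

-- A's first loop builds the digit concatenation
lemma pvJoin_eq (blocks : List Int) (acc : String) :
    (blocks.foldl (fun acc n => acc ++ PySem.Int.toStr n) acc).toList
      = acc.toList ++ (blocks.map (fun n => PySem.Int.toChars n)).flatten := by
  induction blocks generalizing acc with
  | nil => simp
  | cons b bs ih =>
    simp [List.foldl_cons, ih, ← PySem.Int.toList_toStr]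

-- A's state machine, started on an even index with empty accumulator, decodes the pairs
lemma pvALoop_eq (s : List Char) : ∀ (k : Nat) (d : List Char),
    pvALoop s (2 * k) [] d = d ++ pvDecodePairs s := by
  induction s using pvPairUp.induct with
  | case1 c1 c2 rest ih =>
    intro k d
    have h1 : (2 * k) % 2 = 0 := Nat.mul_mod_right 2 k
    have h2 : (2 * k + 1) % 2 = 1 := by omega
    have h3 : 2 * k + 1 + 1 = 2 * (k + 1) := by omega
    simp only [pvALoop, List.nil_append, h1, List.singleton_append, h2, h3, ih (k + 1)]
    simp [pvDecodePairs, pvPairUp]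
  | case2 s hs =>
    intro k d
    have h1 : (2 * k) % 2 = 0 := Nat.mul_mod_right 2 k
    rcases s with _ | ⟨c, _ | ⟨c2, rest⟩⟩
    · simp [pvALoop, pvDecodePairs, pvPairUp]
    · simp [pvALoop, pvDecodePairs, pvPairUp, h1]
    · exact absurd rfl (hs c c2 rest)

-- B's per-chunk slicing pass computes exactly the chunk's pair decode
lemma pvRangePairs (t : List Char) :
    (List.range (t.length / 2)).map (fun i => pvDecodeChunk ((t.drop (2 * i)).take 2))
      = pvDecodePairs t := by
  induction t using pvPairUp.induct with
  | case1 c1 c2 rest ih =>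
    have hlen : (c1 :: c2 :: rest).length / 2 = rest.length / 2 + 1 := by
      simp [List.length_cons]; omega
    rw [hlen, List.range_succ_eq_map]
    simp only [List.map_cons, List.map_map, pvDecodePairs, pvPairUp]
    congr 1
  | case2 t ht =>
    rcases t with _ | ⟨c, _ | ⟨c2, rest⟩⟩
    · simp [pvDecodePairs, pvPairUp]
    · simp [pvDecodePairs, pvPairUp]
    · exact absurd rfl (ht c c2 rest)

-- pairing splits at a chunk's even prefix, the leftover joining the rest
lemma pvPairUp_append (t X : List Char) :
    pvPairUp (t ++ X) = pvPairUp t ++ pvPairUp (t.drop (2 * (t.length / 2)) ++ X) := by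
  induction t using pvPairUp.induct with
  | case1 c1 c2 rest ih =>
    have hlen : (c1 :: c2 :: rest).length / 2 = rest.length / 2 + 1 := by
      simp [List.length_cons]; omega
    simp only [hlen, List.cons_append, pvPairUp, Nat.mul_add, List.drop_succ_cons, ih]
  | case2 t ht =>
    rcases t with _ | ⟨c, _ | ⟨c2, rest⟩⟩
    · simp [pvPairUp]
    · simp [pvPairUp]
    · exact absurd rfl (ht c c2 rest)

-- restated for the decoded chunks, as B's loop uses it
lemma pvDecodePairs_chunk (t X : List Char) :
    pvDecodePairs t ++ pvDecodePairs (t.drop (2 * (t.length / 2)) ++ X) = pvDecodePairs (t ++ X) := by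
  unfold pvDecodePairs
  rw [pvPairUp_append t X, List.map_append]

-- the main invariant of B's streaming loop
lemma pvBLoop_eq : ∀ (blocks : List Int) (carry out : List Char), carry.length ≤ 1 →
    pvBLoop blocks carry out
      = out ++ pvDecodePairs (carry ++ (blocks.map (fun n => PySem.Int.toChars n)).flatten) := by
  intro blocks
  induction blocks with
  | nil =>
    intro carry out h
    rcases carry with _ | ⟨c, _ | _⟩
    · simp [pvBLoop, pvDecodePairs, pvPairUp]
    · simp [pvBLoop, pvDecodePairs, pvPairUp]
    · simp at h
  | cons n rest ih =>
    intro carry out h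
    simp only [pvBLoop, PySem.List.slice_from_natCast, PySem.List.slice_natCast]
    rw [ih _ _ (by simp [List.length_drop]; omega)]
    have hsimp : ∀ i : Nat, 2 * i + 2 - 2 * i = 2 := by omega
    simp only [hsimp, pvRangePairs, List.map_cons, List.flatten_cons, List.append_assoc]
    rw [pvDecodePairs_chunk (carry ++ PySem.Int.toChars n)
        ((rest.map (fun n => PySem.Int.toChars n)).flatten)]
    simp

-- ===== VERDICT (by name: the statement is the Claim_ definition above) =====
theorem blockstotext_spec : Claim_equal_blockstotext := by
  intro blocks _ _
  unfold Spec_blockstotext blockstotext blockstotext_alt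
  have hA := pvALoop_eq ((blocks.map (fun n => PySem.Int.toChars n)).flatten) 0 []
  simp only [Nat.mul_zero] at hA
  rw [pvBLoop_eq blocks [] [] (by simp)]
  simp [pvJoin_eq blocks "", hA]
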